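-- pv_equiv track=rewrite | github.com/s1280061/v2x-lang-risa | src/smooth_trackid_and_redraw.py | _mode_with_tie_break
-- ===== SOURCE A (Python) =====
-- from collections import Counter, deque
--
-- SMOOTH_TIE_BREAK = "recent"   # "recent" or "keep_last"
--
-- def _mode_with_tie_break(history: list[int], last_smoothed: int | None) -> int:
--     c = Counter(history)
--     max_cnt = max(c.values())
--     candidates = {k for k, v in c.items() if v == max_cnt}
--
--     if SMOOTH_TIE_BREAK == "keep_last" and last_smoothed is not None and last_smoothed in candidates:
--         return last_smoothed
--
--     for tid in reversed(history):
--         if tid in candidates: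
--             return tid
--     return history[-1]
-- ===== SOURCE B (Python) =====
-- SMOOTH_TIE_BREAK = "recent"   # "recent" or "keep_last"
--
-- def _mode_with_tie_break(history: "list[int]", last_smoothed: "int | None") -> int:
--     counts = {}
--     last = {}
--     for i, tid in enumerate(history):
--         counts[tid] = counts.get(tid, 0) + 1
--         last[tid] = i
--     max_cnt = max(counts.values())
--
--     if SMOOTH_TIE_BREAK == "keep_last" and last_smoothed is not None and counts.get(last_smoothed) == max_cnt:
--         return last_smoothed
--
--     best = None
--     for tid, cnt in counts.items():
--         if cnt == max_cnt and (best is None or last[tid] > last[best]):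
--             best = tid
--     return best
-- ===== Notes on version B (the rewrite author's own statement) =====
-- stated objective: alternative
-- what changed: B replaces A's Counter + candidate-set + reversed re-scan of history by a single forward pass that builds both a count dict and a last-index dict, then picks the max-count id with the greatest last index by one argmax over the dict items.
import Mathlib
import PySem

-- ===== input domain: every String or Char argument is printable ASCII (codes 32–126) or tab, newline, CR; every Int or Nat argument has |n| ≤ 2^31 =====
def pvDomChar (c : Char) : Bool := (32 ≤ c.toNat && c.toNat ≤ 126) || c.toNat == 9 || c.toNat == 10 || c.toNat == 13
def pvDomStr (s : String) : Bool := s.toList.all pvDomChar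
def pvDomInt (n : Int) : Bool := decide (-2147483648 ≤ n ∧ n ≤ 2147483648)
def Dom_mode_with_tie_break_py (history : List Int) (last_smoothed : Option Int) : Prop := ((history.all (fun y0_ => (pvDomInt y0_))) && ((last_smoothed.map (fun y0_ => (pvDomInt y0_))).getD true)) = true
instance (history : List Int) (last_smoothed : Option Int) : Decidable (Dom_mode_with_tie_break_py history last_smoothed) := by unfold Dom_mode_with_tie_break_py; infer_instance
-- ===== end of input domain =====

-- B replaces A's reversed candidate re-scan by a single forward pass that also records each id's
-- last index, then takes one argmax over the count dict (objective: alternative decomposition, same O(n)).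

-- module constant shared by both Python files
def SMOOTH_TIE_BREAK_py : String := "recent"

-- ===== PORT A =====
def mode_with_tie_break_py (history : List Int) (last_smoothed : Option Int) : Int :=
  let c := PySem.Dict.counter history
  let max_cnt := (PySem.List.max? c.values (fun v => v)).getD 0
  let candidates : PySem.Set Int :=
    PySem.Set.ofList ((c.items.filter (fun kv => kv.2 == max_cnt)).map (fun kv => kv.1))
  if SMOOTH_TIE_BREAK_py == "keep_last" && last_smoothed.isSome &&
      PySem.Set.contains candidates (last_smoothed.getD 0) then
    last_smoothed.getD 0
  else
    match history.reverse.find? (fun tid => PySem.Set.contains candidates tid) with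
    | some tid => tid
    | none => PySem.List.pyGetD history (-1) 0

-- ===== PORT B =====
def mode_with_tie_break_py_alt (history : List Int) (last_smoothed : Option Int) : Int :=
  let st := (PySem.List.enumerate history).foldl
      (fun (st : PySem.Dict Int Int × PySem.Dict Int Int) p =>
        (st.1.insert p.2 (st.1.getD p.2 0 + 1), st.2.insert p.2 p.1))
      (PySem.Dict.empty, PySem.Dict.empty)
  let counts := st.1
  let last := st.2
  let max_cnt := (PySem.List.max? counts.values (fun v => v)).getD 0
  if SMOOTH_TIE_BREAK_py == "keep_last" && last_smoothed.isSome &&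
      (counts.get? (last_smoothed.getD 0) == some max_cnt) then
    last_smoothed.getD 0
  else
    let best := counts.items.foldl
      (fun (best : Option Int) kv =>
        if kv.2 == max_cnt &&
            (match best with
             | none => true
             | some b => decide (last.getD b (-1) < last.getD kv.1 (-1)))
        then some kv.1 else best) none
    best.getD 0

-- ===== PRECONDITION & SPEC =====
-- Pre_ excludes only the empty history, on which A raises ValueError (max() of an empty sequence).
def Pre_mode_with_tie_break_py (history : List Int) (last_smoothed : Option Int) : Prop :=
  history ≠ []
instance (history : List Int) (last_smoothed : Option Int) : Decidable (Pre_mode_with_tie_break_py history last_smoothed) := by unfold Pre_mode_with_tie_break_py; infer_instance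

def pvWitness_mode_with_tie_break_py : List Int × Option Int := ([1, 2, 2, 1], some 2)

def Spec_mode_with_tie_break_py (history : List Int) (last_smoothed : Option Int) (out : Int) : Prop := out = mode_with_tie_break_py_alt history last_smoothed
instance (history : List Int) (last_smoothed : Option Int) (out : Int) : Decidable (Spec_mode_with_tie_break_py history last_smoothed out) := by unfold Spec_mode_with_tie_break_py; infer_instance

-- ===== CLAIM (what is proved, stated in full; the proofs are below) =====
def Claim_equal_mode_with_tie_break_py : Prop := ∀ (history : List Int) (last_smoothed : Option Int), Dom_mode_with_tie_break_py history last_smoothed → Pre_mode_with_tie_break_py history last_smoothed → Spec_mode_with_tie_break_py history last_smoothed (mode_with_tie_break_py history last_smoothed)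

-- ===== LEMMAS AND PROOFS =====

-- the last-index dictionary B's forward pass builds
def pvLastDict (hs : List Int) : PySem.Dict Int Int :=
  (PySem.List.enumerate hs).foldl (fun d p => d.insert p.2 p.1) PySem.Dict.empty

theorem pvLastDict_snoc (xs : List Int) (x : Int) :
    pvLastDict (xs ++ [x]) = (pvLastDict xs).insert x (xs.length : Int) := by
  simp [pvLastDict, PySem.List.enumerate_append, List.foldl_append,
    PySem.List.enumerate_cons, PySem.List.enumerate_nil]

-- the last-index dict holds (length - 1 - index of first occurrence in reverse)
theorem pvLastDict_getD (hs : List Int) (k : Int) (h : k ∈ hs) :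
    (pvLastDict hs).getD k (-1) = ((hs.length - 1 - hs.reverse.idxOf k : Nat) : Int) := by
  induction hs using List.reverseRecOn with
  | nil => simp at h
  | append_singleton xs x ih =>
    rw [pvLastDict_snoc]
    by_cases hk : k = x
    · subst hk
      rw [PySem.Dict.getD_insert_self]
      simp [List.reverse_append]
    · rw [PySem.Dict.getD_insert_of_ne _ _ _ hk]
      have hk' : k ∈ xs := by
        rcases List.mem_append.mp h with h1 | h1
        · exact h1
        · simp at h1; exact absurd h1 hk
      have hidx : xs.reverse.idxOf k < xs.reverse.length :=
        List.idxOf_lt_length_of_mem (by simpa using hk')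
      rw [ih hk']
      rw [List.reverse_append]
      simp only [List.reverse_singleton, List.singleton_append, List.length_append,
        List.length_singleton, List.idxOf_cons_ne _ (Ne.symm hk)]
      simp at hidx
      congr 1
      omega

-- B's counting component over enumerate is the plain counting fold over the list
theorem pvCounts_fold (hs : List Int) : ∀ (s : Int) (d0 : PySem.Dict Int Int),
    (PySem.List.enumerate hs s).foldl (fun d p => d.insert p.2 (d.getD p.2 0 + 1)) d0
      = hs.foldl (fun d x => d.insert x (d.getD x 0 + 1)) d0 := by
  induction hs with
  | nil => intro s d0; simp [PySem.List.enumerate_nil]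
  | cons x t ih => intro s d0; simp [PySem.List.enumerate_cons, ih]

-- B's selection fold keeps the ok-invariant over keys distinct from a
theorem pvFoldB_ok (hs : List Int) (L : PySem.Dict Int Int) (M a : Int) :
    ∀ (l : List Int), (∀ k ∈ l, k ∈ hs ∧ k ≠ a) →
    ∀ (acc : Option Int),
      (acc = none ∨ ∃ c, acc = some c ∧ c ∈ hs ∧ (hs.count c : Int) = M ∧ c ≠ a) →
      (((l.map (fun k => (k, (hs.count k : Int)))).foldl
          (fun (best : Option Int) kv =>
            if kv.2 == M &&
                (match best with
                 | none => true
                 | some b => decide (L.getD b (-1) < L.getD kv.1 (-1)))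
            then some kv.1 else best) acc) = none ∨
        ∃ c, ((l.map (fun k => (k, (hs.count k : Int)))).foldl
          (fun (best : Option Int) kv =>
            if kv.2 == M &&
                (match best with
                 | none => true
                 | some b => decide (L.getD b (-1) < L.getD kv.1 (-1)))
            then some kv.1 else best) acc) = some c ∧
          c ∈ hs ∧ (hs.count c : Int) = M ∧ c ≠ a) := by
  intro l
  induction l with
  | nil => intro _ acc hacc; simpa using hacc
  | cons k t ih =>
    intro hl acc hacc
    simp only [List.map_cons, List.foldl_cons]
    apply ih (fun x hx => hl x (List.mem_cons_of_mem _ hx))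
    have hkgood : k ∈ hs ∧ k ≠ a := hl k List.mem_cons_self
    rcases hacc with rfl | ⟨c, rfl, hc⟩
    · by_cases hM : (hs.count k : Int) = M
      · simp only [hM, BEq.rfl, Bool.true_and, if_pos]
        exact Or.inr ⟨k, rfl, hkgood.1, hM, hkgood.2⟩
      · rw [if_neg (by simp [beq_eq_false_iff_ne.mpr hM])]
        exact Or.inl rfl
    · by_cases hcond : ((hs.count k : Int) == M &&
          decide (L.getD c (-1) < L.getD k (-1))) = true
      · rw [if_pos hcond]
        exact Or.inr ⟨k, rfl, hkgood.1,
          beq_iff_eq.mp ((Bool.and_eq_true _ _).mp hcond).1, hkgood.2⟩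
      · rw [if_neg hcond]
        exact Or.inr ⟨c, rfl, hc⟩

-- once B's selection fold holds a, it keeps a (a beats every other max-count key)
theorem pvFoldB_keep (hs : List Int) (L : PySem.Dict Int Int) (M a : Int)
    (HC : ∀ c ∈ hs, (hs.count c : Int) = M → c ≠ a →
      L.getD c (-1) < L.getD a (-1)) :
    ∀ (l : List Int), (∀ k ∈ l, k ∈ hs) →
    ((l.map (fun k => (k, (hs.count k : Int)))).foldl
        (fun (best : Option Int) kv =>
          if kv.2 == M &&
              (match best with
               | none => true
               | some b => decide (L.getD b (-1) < L.getD kv.1 (-1)))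
          then some kv.1 else best) (some a)) = some a := by
  intro l
  induction l with
  | nil => intro _; simp
  | cons k t ih =>
    intro hl
    simp only [List.map_cons, List.foldl_cons]
    have hcond : ((hs.count k : Int) == M &&
        (decide (L.getD a (-1) < L.getD k (-1)))) = false := by
      by_cases hk : k = a
      · subst hk; simp
      · by_cases hM : (hs.count k : Int) = M
        · have := HC k (hl k List.mem_cons_self) hM hk
          simp [not_lt.mpr (le_of_lt this)]
        · simp [beq_eq_false_iff_ne.mpr hM]
    rw [if_neg (by simp only [hcond]; exact Bool.false_ne_true)]
    exact ih (fun x hx => hl x (List.mem_cons_of_mem _ hx))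

-- assembled: B's selection fold over all keys returns a
theorem pvFoldB_main (hs : List Int) (L : PySem.Dict Int Int) (M a : Int)
    (HC : ∀ c ∈ hs, (hs.count c : Int) = M → c ≠ a →
      L.getD c (-1) < L.getD a (-1))
    (l1 l2 : List Int) (h1 : ∀ k ∈ l1, k ∈ hs ∧ k ≠ a) (h2 : ∀ k ∈ l2, k ∈ hs)
    (haM : (hs.count a : Int) = M) :
    (((l1 ++ a :: l2).map (fun k => (k, (hs.count k : Int)))).foldl
        (fun (best : Option Int) kv =>
          if kv.2 == M &&
              (match best with
               | none => true
               | some b => decide (L.getD b (-1) < L.getD kv.1 (-1)))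
          then some kv.1 else best) none) = some a := by
  rw [List.map_append, List.foldl_append, List.map_cons, List.foldl_cons]
  rcases pvFoldB_ok hs L M a l1 h1 none (Or.inl rfl) with h0 | ⟨c, h0, hc1, hc2, hc3⟩
  · rw [h0]
    have hstep : (if (((a, (hs.count a : Int)).2 == M &&
          (match (none : Option Int) with
           | none => true
           | some b => decide (L.getD b (-1) < L.getD (a, (hs.count a : Int)).1 (-1)))) = true)
        then some (a, (hs.count a : Int)).1 else (none : Option Int)) = some a := by
      simp [haM]
    rw [hstep]; exact pvFoldB_keep hs L M a HC l2 h2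
  · rw [h0]
    have hstep : (if (((a, (hs.count a : Int)).2 == M &&
          (match (some c : Option Int) with
           | none => true
           | some b => decide (L.getD b (-1) < L.getD (a, (hs.count a : Int)).1 (-1)))) = true)
        then some (a, (hs.count a : Int)).1 else (some c : Option Int)) = some a := by
      have := HC c hc1 hc2 hc3
      simp [haM, this]
    rw [hstep]; exact pvFoldB_keep hs L M a HC l2 h2

-- ===== VERDICT (by name: the statement is the Claim_ definition above) =====
theorem mode_with_tie_break_py_spec : Claim_equal_mode_with_tie_break_py := by
  intro hs ls _ hpre
  unfold Spec_mode_with_tie_break_py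
  -- the counter's values are the counts over the distinct elements
  have hvals : (PySem.Dict.counter hs).values
      = (PySem.Set.ofList hs).map (fun k => ((hs.count k : Int))) := by
    show ((PySem.Dict.counter hs).items.map (·.2)) = _
    rw [PySem.Dict.items_counter]
    simp [List.map_map, Function.comp]
  obtain ⟨x0, hx0⟩ := List.exists_mem_of_ne_nil hs hpre
  have hvne : (PySem.Dict.counter hs).values ≠ [] := by
    rw [hvals]
    intro hcon
    have hx0' : x0 ∈ PySem.Set.ofList hs := (PySem.Set.mem_ofList hs x0).mpr hx0
    rw [List.map_eq_nil_iff.mp hcon] at hx0'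
    simp at hx0'
  obtain ⟨m, hmax⟩ : ∃ m, PySem.List.max? (PySem.Dict.counter hs).values (fun v => v) = some m := by
    cases h : PySem.List.max? (PySem.Dict.counter hs).values (fun v => v) with
    | none => exact absurd ((PySem.List.max?_eq_none_iff _ _).mp h) hvne
    | some m => exact ⟨m, rfl⟩
  have hmmem := PySem.List.max?_mem hmax
  rw [hvals] at hmmem
  obtain ⟨k0, hk0mem, hk0⟩ := List.mem_map.mp hmmem
  have hk0hs : k0 ∈ hs := (PySem.Set.mem_ofList hs k0).mp hk0mem
  -- candidate membership = having the maximal count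
  have hcand : ∀ t : Int,
      (PySem.Set.contains (PySem.Set.ofList
         (((PySem.Dict.counter hs).items.filter (fun kv => kv.2 == m)).map (fun kv => kv.1))) t = true)
      ↔ (t ∈ hs ∧ (hs.count t : Int) = m) := by
    intro t
    rw [PySem.Set.contains_iff, PySem.Set.mem_ofList, PySem.Dict.items_counter]
    constructor
    · intro h
      obtain ⟨kv, hkv, rfl⟩ := List.mem_map.mp h
      obtain ⟨hkvmem, hkveq⟩ := List.mem_filter.mp hkv
      obtain ⟨k, hk, rfl⟩ := List.mem_map.mp hkvmem
      exact ⟨(PySem.Set.mem_ofList hs k).mp hk, beq_iff_eq.mp hkveq⟩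
    · intro ⟨hthp, htm⟩
      refine List.mem_map.mpr ⟨(t, (hs.count t : Int)), List.mem_filter.mpr ⟨?_, ?_⟩, rfl⟩
      · exact List.mem_map.mpr ⟨t, (PySem.Set.mem_ofList hs t).mpr hthp, rfl⟩
      · exact beq_iff_eq.mpr htm
  -- A's reversed scan succeeds; decompose it
  obtain ⟨a, hfa⟩ : ∃ a, hs.reverse.find? (fun tid => PySem.Set.contains (PySem.Set.ofList
      (((PySem.Dict.counter hs).items.filter (fun kv => kv.2 == m)).map (fun kv => kv.1))) tid) = some a := by
    refine Option.isSome_iff_exists.mp (List.find?_isSome.mpr ⟨k0, List.mem_reverse.mpr hk0hs, ?_⟩)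
    exact (hcand k0).mpr ⟨hk0hs, hk0⟩
  obtain ⟨pa, as, bs, hrev, hasf⟩ := List.find?_eq_some_iff_append.mp hfa
  have hahs : a ∈ hs := by
    have : a ∈ hs.reverse := by
      rw [hrev]; exact List.mem_append_right _ List.mem_cons_self
    exact List.mem_reverse.mp this
  have haM : (hs.count a : Int) = m := ((hcand a).mp pa).2
  have hanotas : a ∉ as := by
    intro hmem
    have := hasf a hmem
    rw [pa] at this
    simp at this
  -- a is strictly the most recent maximal-count id
  have HC : ∀ c ∈ hs, (hs.count c : Int) = m → c ≠ a →
      (pvLastDict hs).getD c (-1) < (pvLastDict hs).getD a (-1) := by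
    intro c hchs hcM hca
    have pc := (hcand c).mpr ⟨hchs, hcM⟩
    have hcnotas : c ∉ as := by
      intro hmem
      have := hasf c hmem
      rw [pc] at this
      simp at this
    have hcrev : c ∈ hs.reverse := List.mem_reverse.mpr hchs
    have hcbs : c ∈ bs := by
      rw [hrev] at hcrev
      rcases List.mem_append.mp hcrev with h | h
      · exact absurd h hcnotas
      · rcases List.mem_cons.mp h with h | h
        · exact absurd h hca
        · exact h
    have hia : hs.reverse.idxOf a = as.length := by
      rw [hrev, List.idxOf_append_of_notMem hanotas, List.idxOf_cons_self]
      omega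
    have hic : hs.reverse.idxOf c = as.length + (bs.idxOf c + 1) := by
      rw [hrev, List.idxOf_append_of_notMem hcnotas, List.idxOf_cons_ne _ (Ne.symm hca)]
    have hlc : hs.reverse.idxOf c < hs.length := by
      have := List.idxOf_lt_length_of_mem (List.mem_reverse.mpr hchs)
      rwa [List.length_reverse] at this
    rw [pvLastDict_getD hs c hchs, pvLastDict_getD hs a hahs]
    have : hs.length - 1 - hs.reverse.idxOf c < hs.length - 1 - hs.reverse.idxOf a := by omega
    exact_mod_cast this
  -- split the distinct keys around a
  obtain ⟨l1, l2, hl12⟩ := List.mem_iff_append.mp ((PySem.Set.mem_ofList hs a).mpr hahs)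
  have hNd := PySem.Set.nodup_ofList hs
  rw [hl12] at hNd
  have hal1 : a ∉ l1 := fun h => (List.disjoint_of_nodup_append hNd) h List.mem_cons_self
  have h1 : ∀ k ∈ l1, k ∈ hs ∧ k ≠ a := by
    intro k hk
    refine ⟨?_, fun hka => hal1 (hka ▸ hk)⟩
    have : k ∈ PySem.Set.ofList hs := by rw [hl12]; exact List.mem_append_left _ hk
    exact (PySem.Set.mem_ofList hs k).mp this
  have h2 : ∀ k ∈ l2, k ∈ hs := by
    intro k hk
    have : k ∈ PySem.Set.ofList hs := by
      rw [hl12]; exact List.mem_append_right _ (List.mem_cons_of_mem _ hk)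
    exact (PySem.Set.mem_ofList hs k).mp this
  -- evaluate port A
  have hA : mode_with_tie_break_py hs ls = a := by
    simp only [mode_with_tie_break_py]
    rw [hmax]
    simp only [Option.getD_some]
    rw [show (SMOOTH_TIE_BREAK_py == "keep_last") = false from rfl]
    simp only [Bool.false_and, Bool.false_eq_true, if_false]
    rw [hfa]
  -- evaluate port B
  have hB : mode_with_tie_break_py_alt hs ls = a := by
    simp only [mode_with_tie_break_py_alt]
    rw [PySem.List.foldl_prod_mk
      (f := fun (d : PySem.Dict Int Int) (p : Int × Int) => d.insert p.2 (d.getD p.2 0 + 1))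
      (g := fun (d : PySem.Dict Int Int) (p : Int × Int) => d.insert p.2 p.1)]
    rw [pvCounts_fold hs 0 PySem.Dict.empty,
      PySem.Dict.foldl_insert_getD_add_one_eq_counter]
    rw [show (PySem.List.enumerate hs 0).foldl
        (fun (d : PySem.Dict Int Int) (p : Int × Int) => d.insert p.2 p.1) PySem.Dict.empty
        = pvLastDict hs from rfl]
    rw [hmax]
    simp only [Option.getD_some]
    rw [show (SMOOTH_TIE_BREAK_py == "keep_last") = false from rfl]
    simp only [Bool.false_and, Bool.false_eq_true, if_false]
    rw [PySem.Dict.items_counter, hl12]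
    exact congrArg (fun o : Option Int => o.getD 0)
      (pvFoldB_main hs (pvLastDict hs) m a HC l1 l2 h1 h2 haM)
  rw [hA, hB]
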